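-- pv_equiv track=rewrite | github.com/arjuna-dev/llm_parametrizer | llm_parametrizer/llm_parametrizer.py | add_tweaked_prompts
-- ===== SOURCE A (Python) =====
-- from itertools import product
--
-- def add_tweaked_prompts(prompt_with_variables, values):
--     keys = values.keys()
--     values = values.values()
--
--     combinations = list(product(*values))
--
--     prompts = []
--     for combination in combinations:
--         temp_prompt = prompt_with_variables
--         for key, value in zip(keys, combination):
--             temp_prompt = temp_prompt.replace(f'{{{key}}}', value)
--         prompts.append(temp_prompt)
--
--     return prompts
-- ===== SOURCE B (Python) =====
-- def add_tweaked_prompts(prompt_with_variables, values):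
--     results = [prompt_with_variables]
--     for key, value_list in values.items():
--         results = [p.replace('{' + key + '}', v) for p in results for v in value_list]
--     return results
-- ===== Notes on version B (the rewrite author's own statement) =====
-- stated objective: simpler
-- what changed: Replaces itertools.product plus a per-combination sequential-replace loop by a single fold over the ordered keys that expands partial prompts incrementally, never materializing combinations.
import Mathlib
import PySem

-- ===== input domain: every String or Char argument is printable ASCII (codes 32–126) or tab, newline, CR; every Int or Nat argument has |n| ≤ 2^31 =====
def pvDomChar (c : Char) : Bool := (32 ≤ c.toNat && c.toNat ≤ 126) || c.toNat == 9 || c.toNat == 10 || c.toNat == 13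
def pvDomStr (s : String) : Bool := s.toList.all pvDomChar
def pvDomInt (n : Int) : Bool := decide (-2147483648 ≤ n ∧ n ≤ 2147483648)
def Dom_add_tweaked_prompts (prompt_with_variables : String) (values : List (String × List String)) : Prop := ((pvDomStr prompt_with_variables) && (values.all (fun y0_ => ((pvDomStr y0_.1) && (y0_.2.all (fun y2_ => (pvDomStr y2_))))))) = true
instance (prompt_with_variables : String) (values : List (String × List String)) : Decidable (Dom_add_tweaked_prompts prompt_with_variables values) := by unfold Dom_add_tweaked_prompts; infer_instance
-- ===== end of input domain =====

-- B drops itertools.product and expands partial prompts by folding over the ordered keys (objective: simpler).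
-- ===== PORT A =====
-- itertools.product(*values): outermost list varies slowest, exactly this recursion
def pvProduct (ls : List (List String)) : List (List String) :=
  match ls with
  | [] => [[]]
  | l :: rest => l.flatMap (fun v => (pvProduct rest).map (fun c => v :: c))

def add_tweaked_prompts (prompt_with_variables : String) (values : List (String × List String)) : List String :=
  let keys := values.map Prod.fst
  let vals := values.map Prod.snd
  let combinations := pvProduct vals
  combinations.foldl
    (fun prompts combination =>
      prompts ++ [(keys.zip combination).foldl
        (fun temp_prompt kv => PySem.Str.replace temp_prompt ("{" ++ kv.1 ++ "}") kv.2)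
        prompt_with_variables])
    []

-- ===== PORT B =====
def add_tweaked_prompts_alt (prompt_with_variables : String) (values : List (String × List String)) : List String :=
  values.foldl
    (fun results kv =>
      results.flatMap (fun p => kv.2.map (fun v => PySem.Str.replace p ("{" ++ kv.1 ++ "}") v)))
    [prompt_with_variables]

-- ===== PRECONDITION & SPEC =====
def Spec_add_tweaked_prompts (prompt_with_variables : String) (values : List (String × List String)) (out : List String) : Prop := out = add_tweaked_prompts_alt prompt_with_variables values
instance (prompt_with_variables : String) (values : List (String × List String)) (out : List String) : Decidable (Spec_add_tweaked_prompts prompt_with_variables values out) := by unfold Spec_add_tweaked_prompts; infer_instance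

-- ===== CLAIM (what is proved, stated in full; the proofs are below) =====
def Claim_equal_add_tweaked_prompts : Prop := ∀ (prompt_with_variables : String) (values : List (String × List String)), Dom_add_tweaked_prompts prompt_with_variables values → Spec_add_tweaked_prompts prompt_with_variables values (add_tweaked_prompts prompt_with_variables values)

-- ===== LEMMAS AND PROOFS =====
-- common functional core: expand one prompt through the ordered key/value-list pairs
def pvExpand (p : String) (values : List (String × List String)) : List String :=
  match values with
  | [] => [p]
  | (k, vs) :: rest => vs.flatMap (fun v => pvExpand (PySem.Str.replace p ("{" ++ k ++ "}") v) rest)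

theorem pv_foldl_append {α β : Type} (f : α → β) (l : List α) (acc : List β) :
    l.foldl (fun ps c => ps ++ [f c]) acc = acc ++ l.map f := by
  induction l generalizing acc with
  | nil => simp
  | cons x xs ih => simp [List.foldl_cons, ih]

theorem pv_A_expand (p : String) (values : List (String × List String)) :
    (pvProduct (values.map Prod.snd)).map
      (fun c => ((values.map Prod.fst).zip c).foldl
        (fun temp_prompt kv => PySem.Str.replace temp_prompt ("{" ++ kv.1 ++ "}") kv.2) p)
      = pvExpand p values := by
  induction values generalizing p with
  | nil => simp [pvProduct, pvExpand]
  | cons kv rest ih =>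
      obtain ⟨k, vs⟩ := kv
      simp only [List.map_cons, pvProduct, pvExpand, List.map_flatMap, List.map_map]
      refine List.flatMap_congr ?_
      intro v _
      simpa [Function.comp] using ih (PySem.Str.replace p ("{" ++ k ++ "}") v)

theorem pv_B_expand (values : List (String × List String)) (acc : List String) :
    values.foldl
      (fun results kv =>
        results.flatMap (fun p => kv.2.map (fun v => PySem.Str.replace p ("{" ++ kv.1 ++ "}") v)))
      acc = acc.flatMap (fun p => pvExpand p values) := by
  induction values generalizing acc with
  | nil => simp [pvExpand]
  | cons kv rest ih =>
      obtain ⟨k, vs⟩ := kv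
      simp only [List.foldl_cons, ih, List.flatMap_assoc, pvExpand]
      refine List.flatMap_congr ?_
      intro p _
      simp [List.flatMap_map]

-- ===== VERDICT (by name: the statement is the Claim_ definition above) =====
theorem add_tweaked_prompts_spec : Claim_equal_add_tweaked_prompts := by
  intro p values _
  unfold Spec_add_tweaked_prompts add_tweaked_prompts add_tweaked_prompts_alt
  rw [pv_B_expand, pv_foldl_append]
  simp [pv_A_expand]
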